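-- pv_equiv track=rewrite | github.com/edwardtanguay/edwards-projects-former | scripts/qtools/qstr.py | trimLineBlocks
-- ===== SOURCE A (Python) =====
-- def trimLineBlocks(lineBlocks: list[list[str]]):
-- 	"""
-- 	Remove empty strings from the beginning and end of each inner list.
--
-- 	Args:
-- 		lineBlocks: A list of lists of strings
--
-- 	Returns:
-- 		A new list of lists with empty strings trimmed from the beginning and end of each inner list
-- 	"""
-- 	result = []
--
-- 	for block in lineBlocks:
-- 		# Find the first non-empty/non-tab-only string
-- 		start = 0
-- 		while start < len(block) and block[start].strip() == "":
-- 			start += 1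
--
-- 		# Find the last non-empty/non-tab-only string
-- 		end = len(block) - 1
-- 		while end >= 0 and block[end].strip() == "":
-- 			end -= 1
--
-- 		# Extract the trimmed block
-- 		if start <= end:
-- 			result.append(block[start:end + 1])
-- 		else:
-- 			result.append([])
--
-- 	return result
-- ===== SOURCE B (Python) =====
-- def trimLineBlocks(lineBlocks: list[list[str]]):
--     """Trim blank strings from both ends of each inner list by dropping a
--     blank prefix, reversing, dropping the (former) blank suffix, and reversing back."""
--     def dropBlanks(lines):
--         for i, s in enumerate(lines):
--             if s.strip() != "":
--                 return lines[i:]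
--         return []
--     return [list(reversed(dropBlanks(list(reversed(dropBlanks(block)))))) for block in lineBlocks]
-- ===== Notes on version B (the rewrite author's own statement) =====
-- stated objective: simpler
-- what changed: Replaces the two index-based while-loops plus conditional slice with a single drop-blank-prefix helper applied twice via reversal (drop prefix, reverse, drop prefix, reverse), with no index arithmetic or start<=end case split.
import Mathlib
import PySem

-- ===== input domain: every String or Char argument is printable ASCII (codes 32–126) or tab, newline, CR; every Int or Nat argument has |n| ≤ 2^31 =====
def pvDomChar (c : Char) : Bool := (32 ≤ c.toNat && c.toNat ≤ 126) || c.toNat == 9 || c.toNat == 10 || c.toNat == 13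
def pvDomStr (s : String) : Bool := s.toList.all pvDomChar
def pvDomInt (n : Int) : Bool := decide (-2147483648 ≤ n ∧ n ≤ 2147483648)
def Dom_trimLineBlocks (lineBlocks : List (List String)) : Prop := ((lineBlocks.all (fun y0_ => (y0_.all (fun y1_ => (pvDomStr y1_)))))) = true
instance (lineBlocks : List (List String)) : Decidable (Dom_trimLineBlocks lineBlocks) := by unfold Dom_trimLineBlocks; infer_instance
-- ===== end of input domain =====

-- B trims each block by dropping the blank prefix, reversing, dropping again and reversing back,
-- instead of A's two index-hunting while-loops plus a conditional slice (objective: simpler).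

-- blank test shared by both ports: Python's  s.strip() == ""
def pvBlank (s : String) : Bool := PySem.Str.strip s == ""

-- ===== PORT A =====
-- while start < len(block) and block[start].strip() == "": start += 1
def pvAStart (block : List String) (start : Nat) : Nat :=
  if h : start < block.length ∧ pvBlank (PySem.List.pyGetD block (start : Int) "") then
    pvAStart block (start + 1)
  else start
termination_by block.length - start
decreasing_by omega

-- while end >= 0 and block[end].strip() == "": end -= 1
def pvAEnd (block : List String) (e : Int) : Int :=
  if h : 0 ≤ e ∧ pvBlank (PySem.List.pyGetD block e "") then
    pvAEnd block (e - 1)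
  else e
termination_by (e + 1).toNat
decreasing_by omega

def trimLineBlocks (lineBlocks : List (List String)) : List (List String) :=
  lineBlocks.foldl (fun result block =>
    let start : Int := (pvAStart block 0 : Int)
    let e : Int := pvAEnd block ((block.length : Int) - 1)
    result ++ [if start ≤ e then PySem.List.slice block (some start) (some (e + 1)) else []]) []

-- ===== PORT B =====
-- for i, s in enumerate(lines): if s.strip() != "": return lines[i:]   /   return []
def pvDropBlanks : List String → List String
  | [] => []
  | s :: rest => if pvBlank s = false then s :: rest else pvDropBlanks rest

def trimLineBlocks_alt (lineBlocks : List (List String)) : List (List String) :=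
  lineBlocks.map (fun block => (pvDropBlanks ((pvDropBlanks block).reverse)).reverse)

-- ===== PRECONDITION & SPEC =====
def Spec_trimLineBlocks (lineBlocks : List (List String)) (out : List (List String)) : Prop := out = trimLineBlocks_alt lineBlocks
instance (lineBlocks : List (List String)) (out : List (List String)) : Decidable (Spec_trimLineBlocks lineBlocks out) := by unfold Spec_trimLineBlocks; infer_instance

-- ===== CLAIM (what is proved, stated in full; the proofs are below) =====
def Claim_equal_trimLineBlocks : Prop := ∀ (lineBlocks : List (List String)), Dom_trimLineBlocks lineBlocks → Spec_trimLineBlocks lineBlocks (trimLineBlocks lineBlocks)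

-- ===== LEMMAS AND PROOFS =====

theorem pvDropBlanks_eq_dropWhile (l : List String) :
    pvDropBlanks l = l.dropWhile pvBlank := by
  induction l with
  | nil => rfl
  | cons s rest ih =>
    simp only [pvDropBlanks, List.dropWhile_cons]
    cases h : pvBlank s <;> simp [ih]

theorem dropWhile_eq_drop_len (p : String → Bool) (l : List String) :
    l.dropWhile p = l.drop (l.takeWhile p).length := by
  induction l with
  | nil => rfl
  | cons s rest ih =>
    cases h : p s <;>
      simp [h, ih]

theorem pvAStart_eq (block : List String) (s : Nat) (hs : s ≤ block.length) :
    pvAStart block s = s + ((block.drop s).takeWhile pvBlank).length := by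
  fun_induction pvAStart block s with
  | case1 s h ih =>
    obtain ⟨hlt, hb⟩ := h
    rw [PySem.List.pyGetD_natCast, List.getD_eq_getElem _ _ hlt] at hb
    rw [List.drop_eq_getElem_cons hlt, List.takeWhile_cons_of_pos hb]
    rw [ih (by omega)]
    simp; omega
  | case2 s h =>
    rcases Nat.lt_or_ge s block.length with hlt | hge
    · have hb : pvBlank (PySem.List.pyGetD block (s : Int) "") = false := by
        cases hb : pvBlank (PySem.List.pyGetD block (s : Int) "") with
        | true => exact absurd ⟨hlt, hb⟩ h
        | false => rfl
      rw [PySem.List.pyGetD_natCast, List.getD_eq_getElem _ _ hlt] at hb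
      rw [List.drop_eq_getElem_cons hlt, List.takeWhile_cons_of_neg (by simp [hb])]
      simp
    · have : block.drop s = [] := List.drop_eq_nil_of_le hge
      simp [this]

theorem pvAEnd_append (xs : List String) (a : String) (e : Int) (he : e < (xs.length : Int)) :
    pvAEnd (xs ++ [a]) e = pvAEnd xs e := by
  fun_induction pvAEnd (xs ++ [a]) e with
  | case1 e h ih =>
    obtain ⟨h0, hb⟩ := h
    have hlt : e.toNat < xs.length := by omega
    have hg : PySem.List.pyGetD (xs ++ [a]) e "" = PySem.List.pyGetD xs e "" := by
      rw [PySem.List.pyGetD_eq_getElem _ _ h0 (by simp; omega),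
          PySem.List.pyGetD_eq_getElem _ _ h0 (by omega)]
      exact List.getElem_append_left hlt
    rw [hg] at hb
    rw [ih (by omega)]
    conv_rhs => rw [pvAEnd]
    rw [dif_pos ⟨h0, hb⟩]
  | case2 e h =>
    have hb' : ¬ (0 ≤ e ∧ pvBlank (PySem.List.pyGetD xs e "") = true) := by
      intro ⟨h0, hb⟩
      apply h
      refine ⟨h0, ?_⟩
      have hlt : e.toNat < xs.length := by omega
      rw [PySem.List.pyGetD_eq_getElem _ _ h0 (by simp; omega),
          List.getElem_append_left hlt,
          ← PySem.List.pyGetD_eq_getElem _ _ h0 (by omega)]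
      exact hb
    rw [pvAEnd, dif_neg hb']

theorem pvAEnd_rev (r : List String) :
    pvAEnd r.reverse ((r.length : Int) - 1) =
      (r.length : Int) - 1 - ((r.takeWhile pvBlank).length : Int) := by
  induction r with
  | nil =>
    rw [pvAEnd]
    norm_num
  | cons s rs ih =>
    have hrev : (s :: rs).reverse = rs.reverse ++ [s] := by simp
    have hlen : ((s :: rs).length : Int) - 1 = (rs.length : Int) := by simp
    rw [hrev, hlen]
    have hget : PySem.List.pyGetD (rs.reverse ++ [s]) (rs.length : Int) "" = s := by
      rw [PySem.List.pyGetD_eq_getElem _ _ (by positivity) (by simp)]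
      simp
    cases hb : pvBlank s with
    | true =>
      rw [pvAEnd, dif_pos ⟨by positivity, by rw [hget]; exact hb⟩]
      rw [pvAEnd_append rs.reverse s _ (by simp)]
      rw [ih, List.takeWhile_cons_of_pos hb]
      simp
      omega
    | false =>
      rw [pvAEnd, dif_neg (by rw [hget]; simp [hb])]
      rw [List.takeWhile_cons_of_neg (by simp [hb])]
      simp

-- the per-block equality of the two trims
theorem trim_block_eq (block : List String) :
    (if (pvAStart block 0 : Int) ≤ pvAEnd block ((block.length : Int) - 1) then
        PySem.List.slice block (some (pvAStart block 0 : Int))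
          (some (pvAEnd block ((block.length : Int) - 1) + 1))
      else []) =
      (pvDropBlanks ((pvDropBlanks block).reverse)).reverse := by
  have hst : pvAStart block 0 = (block.takeWhile pvBlank).length := by
    rw [pvAStart_eq block 0 (Nat.zero_le _)]; simp
  have hen := pvAEnd_rev block.reverse
  rw [List.reverse_reverse, List.length_reverse] at hen
  set st := (block.takeWhile pvBlank).length with hstdef
  set q := (block.reverse.takeWhile pvBlank).length with hqdef
  have hstle : st ≤ block.length := (List.takeWhile_sublist _).length_le
  have hqle : q ≤ block.length := by
    have := (List.takeWhile_sublist (l := block.reverse) pvBlank).length_le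
    simpa using this
  rw [pvDropBlanks_eq_dropWhile, pvDropBlanks_eq_dropWhile]
  cases hd : block.dropWhile pvBlank with
  | nil =>
    -- every element is blank: A's condition start <= end is false, B yields []
    have hall : ∀ x ∈ block, pvBlank x = true := List.dropWhile_eq_nil_iff.mp hd
    have hstn : st = block.length := by
      have : block.takeWhile pvBlank = block := List.takeWhile_eq_self_iff.mpr hall
      rw [hstdef, this]
    have hqn : q = block.length := by
      have : block.reverse.takeWhile pvBlank = block.reverse := by
        rw [List.takeWhile_eq_self_iff]; intro x hx; exact hall x (List.mem_reverse.mp hx)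
      rw [hqdef, this]; simp
    rw [if_neg (by rw [hst, hen, hstn, hqn]; omega)]
    simp
  | cons x xs =>
    -- there is a non-blank element
    have hdd : block.dropWhile pvBlank = block.drop st := dropWhile_eq_drop_len pvBlank block
    have hne : block.dropWhile pvBlank ≠ [] := by rw [hd]; simp
    have hx : pvBlank x = false := by
      have h1 := List.head_dropWhile_not (p := pvBlank) (l := block) hne
      rwa [show (block.dropWhile pvBlank).head hne = x from by simp [hd]] at h1
    -- q is the takeWhile length of the reversed dropped list, and it is < |d|
    have hrevsplit : block.reverse = (block.drop st).reverse ++ (block.takeWhile pvBlank).reverse := by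
      conv_lhs => rw [← List.takeWhile_append_dropWhile (p := pvBlank) (l := block)]
      rw [hdd, List.reverse_append]
    have hqlt : (((block.drop st).reverse).takeWhile pvBlank).length < (block.drop st).length := by
      rcases Nat.lt_or_ge (((block.drop st).reverse).takeWhile pvBlank).length (block.drop st).length with h | h
      · exact h
      · exfalso
        have hle := (List.takeWhile_sublist (l := (block.drop st).reverse) pvBlank).length_le
        rw [List.length_reverse] at hle
        have heq : ((block.drop st).reverse).takeWhile pvBlank = (block.drop st).reverse := by
          apply List.takeWhile_eq_self_iff.mpr
          have hlen : (((block.drop st).reverse).takeWhile pvBlank).length = (block.drop st).reverse.length := by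
            rw [List.length_reverse]; omega
          exact fun y hy => List.takeWhile_eq_self_iff.mp
            ((List.takeWhile_sublist _).eq_of_length hlen) y hy
        have : x ∈ (block.drop st).reverse := by rw [← hdd, hd]; simp
        have := List.takeWhile_eq_self_iff.mp heq x this
        rw [hx] at this; exact Bool.false_ne_true this
    have hq' : q = (((block.drop st).reverse).takeWhile pvBlank).length := by
      rw [hqdef, hrevsplit, List.takeWhile_append]
      rw [if_neg (by rw [List.length_reverse]; omega)]
    have hdlen : (block.drop st).length = block.length - st := List.length_drop
    have hqlt' : q < block.length - st := by rw [hq']; omega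
    -- A's branch is taken
    rw [if_pos (by rw [hst, hen]; omega)]
    rw [hst, hen]
    have harith : (block.length : Int) - 1 - (q : Int) + 1 = ((block.length - q : Nat) : Int) := by
      push_cast [Nat.cast_sub hqle]; ring
    rw [harith, PySem.List.slice_natCast]
    -- B's value
    rw [← hd, hdd, dropWhile_eq_drop_len pvBlank, ← hq', List.drop_reverse, List.reverse_reverse]
    -- both are (block.drop st).take (block.length - st - q)
    congr 1
    omega

theorem foldl_trim (lineBlocks : List (List String)) :
    trimLineBlocks lineBlocks =
      lineBlocks.map (fun block =>
        if (pvAStart block 0 : Int) ≤ pvAEnd block ((block.length : Int) - 1) then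
          PySem.List.slice block (some (pvAStart block 0 : Int))
            (some (pvAEnd block ((block.length : Int) - 1) + 1))
        else []) := by
  unfold trimLineBlocks
  rw [PySem.List.foldl_append_singleton_eq_map]
  rfl

-- ===== VERDICT (by name: the statement is the Claim_ definition above) =====
theorem trimLineBlocks_spec : Claim_equal_trimLineBlocks := by
  intro lineBlocks _
  unfold Spec_trimLineBlocks trimLineBlocks_alt
  rw [foldl_trim]
  exact List.map_congr_left (fun block _ => trim_block_eq block)
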